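-- pv_equiv track=rewrite | github.com/blender-nlp/mCLM | kinase_data_processing/molecule_tokenizer_v1.py | ReduceSynthBonds
-- ===== SOURCE A (Python) =====
-- def ReduceSynthBonds(bond_list, ring=True): # pick one from crashing priorities / include ring or not
--     indices = []
--     for i in range(len(bond_list)):
--         if ring==False and int(bond_list[i][1][0]) >= 4:
--             indices.append(i)
--             continue
--         for j in range(len(bond_list)):
--             tuple1 = bond_list[i][0]
--             tuple2 = bond_list[j][0]
--             if i!=j and any(element in tuple2 for element in tuple1):
--                 if (i not in indices) and (j not in indices):
--                     if int(bond_list[i][1][0]) <= int(bond_list[j][1][0]):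
--                         indices.append(j)
--                         continue
--                     if int(bond_list[i][1][0]) >= int(bond_list[j][1][0]):
--                         indices.append(i)
--
--     for k in sorted(indices, reverse=True):
--         del bond_list[k]
--     return bond_list
-- ===== SOURCE B (Python) =====
-- def ReduceSynthBonds(bond_list, ring=True):
--     # Inverted index atom -> bond positions; per bond scan only conflicting bonds
--     # in ascending order. Same greedy removal as the original; return value AND
--     # in-place mutation (slice assignment instead of repeated del) preserved.
--     n = len(bond_list)
--     occ = {}
--     for idx in range(n):
--         for a in bond_list[idx][0]:
--             occ.setdefault(a, []).append(idx)
--     removed = set()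
--     for i in range(n):
--         pi = int(bond_list[i][1][0])
--         if ring == False and pi >= 4:
--             removed.add(i)
--             continue
--         if i in removed:
--             continue
--         for j in sorted({x for a in bond_list[i][0] for x in occ.get(a, [])}):
--             if j == i or j in removed:
--                 continue
--             if pi <= int(bond_list[j][1][0]):
--                 removed.add(j)
--             else:
--                 removed.add(i)
--                 break
--     bond_list[:] = [bond_list[k] for k in range(n) if k not in removed]
--     return bond_list
-- ===== Notes on version B (the rewrite author's own statement) =====
-- stated objective: faster
-- what changed: Replaces the all-pairs inner scan by an inverted index atom->bond positions built in one pass, so each bond only scans its actually-conflicting bonds (in ascending order, matching A's greedy order), and replaces the repeated del by a single filtering pass.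
-- outside the precondition, e.g. on ReduceSynthBonds([((1,), [1]), ((1,), [4])], False): A raises IndexError, B returns [((1,), [1])]; on ReduceSynthBonds([((1,), [1]), ((1,), [])], True): A raises IndexError, B raises IndexError; on ReduceSynthBonds([((), []), ((0,), [0])], True): A returns [((), []), ((0,), [0])], B raises IndexError
import Mathlib
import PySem

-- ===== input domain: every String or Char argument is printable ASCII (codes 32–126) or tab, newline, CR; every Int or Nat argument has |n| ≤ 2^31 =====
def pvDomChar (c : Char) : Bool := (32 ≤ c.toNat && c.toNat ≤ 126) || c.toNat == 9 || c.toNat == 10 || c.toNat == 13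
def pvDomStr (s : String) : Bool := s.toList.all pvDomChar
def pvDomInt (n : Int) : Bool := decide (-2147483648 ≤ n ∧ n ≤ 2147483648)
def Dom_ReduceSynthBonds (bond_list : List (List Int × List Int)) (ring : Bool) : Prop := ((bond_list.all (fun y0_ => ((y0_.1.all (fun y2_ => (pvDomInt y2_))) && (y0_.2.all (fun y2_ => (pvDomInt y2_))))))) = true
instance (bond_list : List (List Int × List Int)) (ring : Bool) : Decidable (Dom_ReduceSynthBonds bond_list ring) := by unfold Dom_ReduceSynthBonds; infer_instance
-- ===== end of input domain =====

-- B replaces A's all-pairs inner scan by an inverted index atom -> bond positions and the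
-- repeated `del` by one filtering pass (objective: faster). Both Pythons mutate bond_list
-- in place to the same final contents; the equivalence proved here is about the return value.


-- ===== PORT A =====
-- bond_list[i][0]  (i always in range where used: loop indices over range(len(bond_list)))
def pvAtoms (bl : List (List Int × List Int)) (i : Nat) : List Int := (bl.getD i ([], [])).1
-- int(bond_list[i][1][0]); the IndexError on an empty priority list is excluded by Pre_
def pvPrio (bl : List (List Int × List Int)) (i : Nat) : Int := (bl.getD i ([], [])).2.headD 0

-- A's inner 'for j in range(len(bond_list))' loop
def pvAInner (bl : List (List Int × List Int)) (i : Nat) (ind : List Nat) : List Nat :=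
  (List.range bl.length).foldl (fun ind j =>
    if i ≠ j ∧ ((pvAtoms bl i).any (fun a => (pvAtoms bl j).contains a)) = true then
      if i ∉ ind ∧ j ∉ ind then
        if pvPrio bl i ≤ pvPrio bl j then ind ++ [j]
        else if pvPrio bl j ≤ pvPrio bl i then ind ++ [i]
        else ind
      else ind
    else ind) ind

def ReduceSynthBonds (bond_list : List (List Int × List Int)) (ring : Bool) : List (List Int × List Int) :=
  let indices := (List.range bond_list.length).foldl (fun ind i =>
    if ring = false ∧ 4 ≤ pvPrio bond_list i then ind ++ [i]
    else pvAInner bond_list i ind) []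
  -- 'for k in sorted(indices, reverse=True): del bond_list[k]' (del's IndexError cannot occur: every k < len)
  (PySem.List.sorted indices (fun k => k) true).foldl (fun l k => l.eraseIdx k) bond_list

-- ===== PORT B =====
-- 'for j in sorted({...}): ... else: removed.add(i); break'
def pvBScan (bl : List (List Int × List Int)) (i : Nat) (js : List Nat) (removed : PySem.Set Nat) : PySem.Set Nat :=
  match js with
  | [] => removed
  | j :: rest =>
    if j = i ∨ j ∈ removed then pvBScan bl i rest removed
    else if pvPrio bl i ≤ pvPrio bl j then pvBScan bl i rest (PySem.Set.add removed j)
    else PySem.Set.add removed i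

def ReduceSynthBonds_alt (bond_list : List (List Int × List Int)) (ring : Bool) : List (List Int × List Int) :=
  -- occ: inverted index atom -> ascending list of bond positions containing it
  let occ := (List.range bond_list.length).foldl (fun d idx =>
    (pvAtoms bond_list idx).foldl (fun d a => d.modify a [] (fun v => v ++ [idx])) d) PySem.Dict.empty
  let removed := (List.range bond_list.length).foldl (fun rem i =>
    if ring = false ∧ 4 ≤ pvPrio bond_list i then PySem.Set.add rem i
    else if i ∈ rem then rem
    else pvBScan bond_list i
      (PySem.List.sorted (PySem.Set.ofList ((pvAtoms bond_list i).flatMap (fun a => occ.getD a []))) (fun k => k) false)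
      rem) PySem.Set.empty
  ((List.range bond_list.length).filter (fun k => decide (k ∉ removed))).map
    (fun k => bond_list.getD k ([], []))

-- ===== PRECONDITION & SPEC =====
-- Pre_ excludes (1) bonds with an empty priority list, where int(b[1][0]) raises IndexError in B
-- always and in A whenever the comparison is reached, and
-- (2) ring=False inputs where a bond of priority < 4 overlaps a later bond of priority >= 4:
-- there A appends that later position twice and the duplicated `del` either raises IndexError
-- or silently deletes an unintended extra bond (an accident of A's index bookkeeping).
def Pre_ReduceSynthBonds (bond_list : List (List Int × List Int)) (ring : Bool) : Prop :=
  (∀ b ∈ bond_list, b.2 ≠ []) ∧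
  (ring = true ∨ bond_list.Pairwise (fun b1 b2 =>
    (∃ a ∈ b1.1, a ∈ b2.1) → ¬(b1.2.headD 0 < 4 ∧ 4 ≤ b2.2.headD 0)))
instance (bond_list : List (List Int × List Int)) (ring : Bool) : Decidable (Pre_ReduceSynthBonds bond_list ring) := by
  unfold Pre_ReduceSynthBonds; infer_instance

def pvWitness_ReduceSynthBonds : (List (List Int × List Int)) × Bool :=
  ([([1, 2], [5]), ([2, 3], [1]), ([7], [2])], false)

def Spec_ReduceSynthBonds (bond_list : List (List Int × List Int)) (ring : Bool) (out : List (List Int × List Int)) : Prop := out = ReduceSynthBonds_alt bond_list ring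
instance (bond_list : List (List Int × List Int)) (ring : Bool) (out : List (List Int × List Int)) : Decidable (Spec_ReduceSynthBonds bond_list ring out) := by unfold Spec_ReduceSynthBonds; infer_instance

-- ===== CLAIM (what is proved, stated in full; the proofs are below) =====
def Claim_equal_ReduceSynthBonds : Prop := ∀ (bond_list : List (List Int × List Int)) (ring : Bool), Dom_ReduceSynthBonds bond_list ring → Pre_ReduceSynthBonds bond_list ring → Spec_ReduceSynthBonds bond_list ring (ReduceSynthBonds bond_list ring)

-- ===== LEMMAS AND PROOFS =====

-- keep the elements of l whose (absolute) position is not listed in s; off = position of l's head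
def pvKeep {α : Type} (l : List α) (s : List Nat) (off : Nat) : List α :=
  match l with
  | [] => []
  | a :: t => if off ∈ s then pvKeep t s (off + 1) else a :: pvKeep t s (off + 1)

theorem pvKeep_congr {α : Type} (l : List α) (s s' : List Nat) (off : Nat)
    (h : ∀ x, off ≤ x → (x ∈ s ↔ x ∈ s')) : pvKeep l s off = pvKeep l s' off := by
  induction l generalizing off with
  | nil => rfl
  | cons a t ih =>
    simp only [pvKeep]
    rw [if_congr (h off le_rfl) rfl rfl, ih (off+1) (fun x hx => h x (by omega))]

theorem pvKeep_erase {α : Type} (l : List α) (s : List Nat) (off k : Nat)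
    (hok : off ≤ k) (hs : ∀ j ∈ s, k < j) :
    (pvKeep l s off).eraseIdx (k - off) = pvKeep l (k :: s) off := by
  induction l generalizing off with
  | nil => rfl
  | cons a t ih =>
    have hoff : off ∉ s := fun h => by have := hs off h; omega
    by_cases hk : off = k
    · subst hk
      simp only [pvKeep, if_neg hoff, Nat.sub_self, List.eraseIdx_cons_zero,
        List.mem_cons, true_or]
      exact pvKeep_congr t s (off :: s) (off+1) (fun x hx => by
        simp only [List.mem_cons]
        constructor
        · exact fun h => Or.inr h
        · rintro (h | h); · omega
          · exact h)
    · have h1 : k - off = (k - (off+1)) + 1 := by omega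
      simp only [pvKeep, if_neg hoff, h1, List.eraseIdx_cons_succ,
        List.mem_cons, if_neg (show ¬(off = k ∨ off ∈ s) by rintro (h|h); exact hk h; exact hoff h)]
      rw [ih (off+1) (by omega)]

theorem pvFoldr_erase {α : Type} (l : List α) (s : List Nat) (h : s.Pairwise (· < ·)) :
    s.foldr (fun k l' => l'.eraseIdx k) l = pvKeep l s 0 := by
  induction s with
  | nil =>
    have : ∀ (m : List α) (off : Nat), pvKeep m [] off = m := by
      intro m; induction m with
      | nil => intro off; rfl
      | cons a t ih => intro off; simp [pvKeep, ih]
    simp [this]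
  | cons k rest ih =>
    have h2 := List.pairwise_cons.mp h
    simp only [List.foldr_cons, ih h2.2]
    have := pvKeep_erase l rest 0 k (Nat.zero_le _) h2.1
    simpa using this

theorem pvKeep_eq_filter_range {α : Type} (l : List α) (s : List Nat) (off : Nat) (d : α) :
    pvKeep l s off
      = ((List.range' off l.length 1).filter (fun k => decide (k ∉ s))).map (fun k => l.getD (k - off) d) := by
  induction l generalizing off with
  | nil => rfl
  | cons a t ih =>
    have hmap : List.map (fun k => (a :: t).getD (k - off) d)
        (List.filter (fun k => decide (k ∉ s)) (List.range' (off+1) t.length))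
        = List.map (fun k => t.getD (k - (off+1)) d)
        (List.filter (fun k => decide (k ∉ s)) (List.range' (off+1) t.length)) := by
      apply List.map_congr_left
      intro k hk
      have hk' : off + 1 ≤ k := (List.mem_range'_1.mp (List.mem_of_mem_filter hk)).1
      have h2 : k - off = (k - (off+1)) + 1 := by omega
      simp [h2]
    simp only [List.length_cons, List.range'_succ, List.filter_cons]
    by_cases hoff : off ∈ s
    · have hd : decide (off ∉ s) = false := by simp [hoff]
      simp only [pvKeep, if_pos hoff, hd, Bool.false_eq_true, if_false, hmap, ih (off+1)]
    · have hd : decide (off ∉ s) = true := by simp [hoff]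
      simp only [pvKeep, if_neg hoff, hd, if_true, List.map_cons, Nat.sub_self,
        List.getD_cons_zero, hmap, ih (off+1)]

-- A's inner-loop body, named for the proofs (pvAInner is the fold of this body over range)
def pvABody (bl : List (List Int × List Int)) (i : Nat) : List Nat → Nat → List Nat :=
  fun ind j =>
    if i ≠ j ∧ ((pvAtoms bl i).any (fun a => (pvAtoms bl j).contains a)) = true then
      if i ∉ ind ∧ j ∉ ind then
        if pvPrio bl i ≤ pvPrio bl j then ind ++ [j]
        else if pvPrio bl j ≤ pvPrio bl i then ind ++ [i]
        else ind
      else ind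
    else ind

theorem pvAInner_eq_fold (bl : List (List Int × List Int)) (i : Nat) (ind : List Nat) :
    pvAInner bl i ind = (List.range bl.length).foldl (pvABody bl i) ind := rfl

-- once i itself is marked, A's inner loop does nothing
theorem pvABody_dead (bl : List (List Int × List Int)) (i : Nat) (L : List Nat) (ind : List Nat)
    (h : i ∈ ind) : L.foldl (pvABody bl i) ind = ind := by
  induction L with
  | nil => rfl
  | cons j T ih =>
    have hb : pvABody bl i ind j = ind := by
      unfold pvABody
      by_cases h1 : i ≠ j ∧ ((pvAtoms bl i).any (fun a => (pvAtoms bl j).contains a)) = true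
      · rw [if_pos h1, if_neg (fun hh => hh.1 h)]
      · rw [if_neg h1]
    simp [hb, ih]

theorem pvSet_add_fresh (s : PySem.Set Nat) (x : Nat) (h : x ∉ s) :
    PySem.Set.add s x = s ++ [x] := by simp [PySem.Set.add, h]

-- A's inner loop over any index list = B's scan over its conflicting sublist
theorem pvScan_eq (bl : List (List Int × List Int)) (i : Nat) (L : List Nat) (ind : List Nat)
    (h : i ∉ ind) :
    L.foldl (pvABody bl i) ind
      = pvBScan bl i (L.filter (fun j => (pvAtoms bl i).any (fun a => (pvAtoms bl j).contains a))) ind := by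
  induction L generalizing ind with
  | nil => rfl
  | cons j T ih =>
    by_cases hc : ((pvAtoms bl i).any (fun a => (pvAtoms bl j).contains a)) = true
    · rw [List.filter_cons_of_pos (by simpa using hc)]
      by_cases hji : j = i
      · subst hji
        have hb : pvABody bl j ind j = ind := by unfold pvABody; simp
        rw [List.foldl_cons, hb, pvBScan, if_pos (Or.inl rfl)]
        exact ih ind h
      · by_cases hjind : j ∈ ind
        · have hb : pvABody bl i ind j = ind := by
            unfold pvABody
            by_cases h1 : i ≠ j ∧ ((pvAtoms bl i).any (fun a => (pvAtoms bl j).contains a)) = true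
            · rw [if_pos h1, if_neg (fun hh => hh.2 hjind)]
            · rw [if_neg h1]
          rw [List.foldl_cons, hb, pvBScan, if_pos (Or.inr hjind)]
          exact ih ind h
        · have hcond : ¬(j = i ∨ j ∈ ind) := by rintro (h1 | h1); exact hji h1; exact hjind h1
          by_cases hp : pvPrio bl i ≤ pvPrio bl j
          · have hb : pvABody bl i ind j = ind ++ [j] := by
              unfold pvABody
              rw [if_pos ⟨fun (he : i = j) => hji he.symm, hc⟩, if_pos ⟨h, hjind⟩, if_pos hp]
            rw [List.foldl_cons, hb, pvBScan, if_neg hcond, if_pos hp,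
              pvSet_add_fresh ind j hjind]
            have hij2 : i ≠ j := fun (he : i = j) => hji he.symm
            exact ih (ind ++ [j]) (by simp [h, hij2])
          · have hb : pvABody bl i ind j = ind ++ [i] := by
              unfold pvABody
              rw [if_pos ⟨fun (he : i = j) => hji he.symm, hc⟩, if_pos ⟨h, hjind⟩, if_neg hp,
                if_pos (le_of_not_ge hp)]
            rw [List.foldl_cons, hb, pvBScan, if_neg hcond, if_neg hp,
              pvSet_add_fresh ind i h]
            exact pvABody_dead bl i T (ind ++ [i]) (by simp)
    · rw [List.filter_cons_of_neg (by simpa using hc)]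
      have hb : pvABody bl i ind j = ind := by
        unfold pvABody
        rw [if_neg (fun hh => hc hh.2)]
      rw [List.foldl_cons, hb]
      exact ih ind h

-- everything B's scan adds is i itself or a scanned index of no smaller priority
theorem pvBScan_shape (bl : List (List Int × List Int)) (i : Nat) (L : List Nat)
    (rem : PySem.Set Nat) (h : i ∉ rem) :
    ∃ S, pvBScan bl i L rem = rem ++ S ∧
      ∀ k ∈ S, k = i ∨ (k ∈ L ∧ pvPrio bl i ≤ pvPrio bl k) := by
  induction L generalizing rem with
  | nil => exact ⟨[], by simp [pvBScan]⟩
  | cons j T ih =>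
    rw [pvBScan]
    split_ifs with h1 h2
    · obtain ⟨S, hS, hm⟩ := ih rem h
      exact ⟨S, hS, fun k hk => (hm k hk).imp id (fun ⟨ha, hb⟩ => ⟨List.mem_cons_of_mem _ ha, hb⟩)⟩
    · have hji : j ∉ rem := fun hh => h1 (Or.inr hh)
      have hij2 : i ≠ j := fun (he : i = j) => h1 (Or.inl he.symm)
      have hij : i ∉ rem ++ [j] := by simp [h, hij2]
      obtain ⟨S, hS, hm⟩ := ih (rem ++ [j]) hij
      refine ⟨j :: S, by rw [pvSet_add_fresh rem j hji, hS]; simp, ?_⟩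
      intro k hk
      rcases List.mem_cons.mp hk with rfl | hk
      · exact Or.inr ⟨List.mem_cons_self .., h2⟩
      · exact (hm k hk).imp id (fun ⟨ha, hb⟩ => ⟨List.mem_cons_of_mem _ ha, hb⟩)
    · exact ⟨[i], by rw [pvSet_add_fresh rem i h], fun k hk => Or.inl (by simpa using hk)⟩

theorem pvBScan_nodup (bl : List (List Int × List Int)) (i : Nat) (L : List Nat)
    (rem : PySem.Set Nat) (h : i ∉ rem) (hnd : rem.Nodup) : (pvBScan bl i L rem).Nodup := by
  induction L generalizing rem with
  | nil => exact hnd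
  | cons j T ih =>
    rw [pvBScan]
    split_ifs with h1 h2
    · exact ih rem h hnd
    · have hji : j ∉ rem := fun hh => h1 (Or.inr hh)
      rw [pvSet_add_fresh rem j hji]
      have hij2 : i ≠ j := fun (he : i = j) => h1 (Or.inl he.symm)
      exact ih (rem ++ [j]) (by simp [h, hij2])
        (by simp only [List.nodup_append, List.nodup_singleton, true_and, and_true]; exact ⟨hnd, by simpa using fun a ha (he : a = j) => hji (he ▸ ha)⟩)
    · rw [pvSet_add_fresh rem i h]
      simp only [List.nodup_append, List.nodup_singleton, true_and, and_true]
      exact ⟨hnd, by simpa using fun a ha (he : a = i) => h (he ▸ ha)⟩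

-- the inverted index: what occ[x] holds
theorem pvOcc_getD (bl : List (List Int × List Int)) (x : Int) :
    ((List.range bl.length).foldl (fun d idx =>
        (pvAtoms bl idx).foldl (fun d a => d.modify a [] (fun v => v ++ [idx])) d)
      (PySem.Dict.empty : PySem.Dict Int (List Nat))).getD x []
    = ((((List.range bl.length).flatMap (fun idx => (pvAtoms bl idx).map (fun a => (a, idx)))).filter
        (fun q => q.1 == x)).map (fun q => q.2)) := by
  have h1 : (fun (d : PySem.Dict Int (List Nat)) idx =>
      (pvAtoms bl idx).foldl (fun d a => d.modify a [] (fun v => v ++ [idx])) d)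
      = (fun d idx => ((pvAtoms bl idx).map (fun a => (a, idx))).foldl
          (fun d (q : Int × Nat) => d.modify q.1 [] (fun v => v ++ [q.2])) d) := by
    funext d idx
    rw [List.foldl_map]
  rw [h1, ← List.foldl_flatMap, PySem.Dict.getD_foldl_modify_append, PySem.Dict.getD_empty]
  simp

theorem pvOcc_mem (bl : List (List Int × List Int)) (x : Int) (j : Nat) :
    j ∈ ((List.range bl.length).foldl (fun d idx =>
        (pvAtoms bl idx).foldl (fun d a => d.modify a [] (fun v => v ++ [idx])) d)
      (PySem.Dict.empty : PySem.Dict Int (List Nat))).getD x []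
    ↔ (j < bl.length ∧ x ∈ pvAtoms bl j) := by
  rw [pvOcc_getD]
  simp only [List.mem_map, List.mem_filter, List.mem_flatMap, List.mem_range]
  constructor
  · rintro ⟨q, ⟨⟨idx, hidx, ⟨a, ha, rfl⟩⟩, hq⟩, rfl⟩
    simp only [beq_iff_eq] at hq
    exact ⟨hidx, hq ▸ ha⟩
  · rintro ⟨hj, hx⟩
    exact ⟨(x, j), ⟨⟨j, hj, ⟨x, hx, rfl⟩⟩, by simp⟩, rfl⟩

-- B's sorted conflict set = the ascending list of conflicting positions
theorem pvNbrs_eq (bl : List (List Int × List Int)) (i : Nat) :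
    PySem.List.sorted (PySem.Set.ofList ((pvAtoms bl i).flatMap (fun a =>
        ((List.range bl.length).foldl (fun d idx =>
            (pvAtoms bl idx).foldl (fun d a => d.modify a [] (fun v => v ++ [idx])) d)
          (PySem.Dict.empty : PySem.Dict Int (List Nat))).getD a []))) (fun k => k) false
    = (List.range bl.length).filter (fun j => (pvAtoms bl i).any (fun a => (pvAtoms bl j).contains a)) := by
  apply PySem.List.sorted_eq_of_perm_of_pairwise_lt
  · apply (List.perm_ext_iff_of_nodup ((List.nodup_range).filter _) (PySem.Set.nodup_ofList _)).mpr
    intro j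
    rw [PySem.Set.mem_ofList]
    simp only [List.mem_filter, List.mem_range, List.mem_flatMap, List.any_eq_true,
      List.contains_iff_mem, pvOcc_mem]
    constructor
    · rintro ⟨hj, a, ha, hmem⟩
      exact ⟨a, ha, hj, hmem⟩
    · rintro ⟨a, ha, hj, hmem⟩
      exact ⟨hj, a, ha, hmem⟩
  · exact (List.pairwise_lt_range).filter _

-- the outer loops of A and B keep identical removal lists
theorem pvOuter_eq (bl : List (List Int × List Int)) (ring : Bool)
    (hp2 : ring = true ∨ ∀ i ∈ List.range bl.length, ∀ j ∈ List.range bl.length, i < j →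
      (∃ a ∈ pvAtoms bl i, a ∈ pvAtoms bl j) → ¬(pvPrio bl i < 4 ∧ 4 ≤ pvPrio bl j)) :
    ∀ (L : List Nat) (ind : List Nat), (∀ k ∈ L, k < bl.length) → L.Pairwise (· < ·) → ind.Nodup →
    (∀ k ∈ ind, k ∈ L → ∃ i', i' < bl.length ∧ i' < k ∧ (∃ a ∈ pvAtoms bl i', a ∈ pvAtoms bl k) ∧
      pvPrio bl i' ≤ pvPrio bl k ∧ (ring = true ∨ pvPrio bl i' < 4)) →
    (L.foldl (fun ind i => if ring = false ∧ 4 ≤ pvPrio bl i then ind ++ [i]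
        else pvAInner bl i ind) ind
      = L.foldl (fun rem i => if ring = false ∧ 4 ≤ pvPrio bl i then PySem.Set.add rem i
        else if i ∈ rem then rem
        else pvBScan bl i
          (PySem.List.sorted (PySem.Set.ofList ((pvAtoms bl i).flatMap (fun a =>
            ((List.range bl.length).foldl (fun d idx =>
                (pvAtoms bl idx).foldl (fun d a => d.modify a [] (fun v => v ++ [idx])) d)
              (PySem.Dict.empty : PySem.Dict Int (List Nat))).getD a []))) (fun k => k) false)
          rem) ind)
    ∧ (L.foldl (fun ind i => if ring = false ∧ 4 ≤ pvPrio bl i then ind ++ [i]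
        else pvAInner bl i ind) ind).Nodup := by
  intro L
  induction L with
  | nil => exact fun ind _ _ hnd _ => ⟨rfl, hnd⟩
  | cons i T ih =>
    intro ind hbound hpair hnd hH
    have hin : i < bl.length := hbound i (List.mem_cons_self ..)
    have hTlt : ∀ k ∈ T, i < k := (List.pairwise_cons.mp hpair).1
    have hiT : i ∉ T := fun hmem => absurd (hTlt i hmem) (lt_irrefl i)
    have hTpair := (List.pairwise_cons.mp hpair).2
    have hTbound : ∀ k ∈ T, k < bl.length := fun k hk => hbound k (List.mem_cons_of_mem _ hk)
    simp only [List.foldl_cons]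
    by_cases hr : ring = false ∧ 4 ≤ pvPrio bl i
    · have hnotin : i ∉ ind := by
        intro hmem
        obtain ⟨i', hi'n, hi'lt, hconf, hple, hring⟩ := hH i hmem (List.mem_cons_self ..)
        rcases hp2 with hp | hp
        · rw [hp] at hr; exact absurd hr.1 (by simp)
        · have hlt4 : pvPrio bl i' < 4 := by
            rcases hring with h | h
            · rw [h] at hr; exact absurd hr.1 (by simp)
            · exact h
          exact hp i' (List.mem_range.mpr hi'n) i (List.mem_range.mpr hin) hi'lt hconf ⟨hlt4, hr.2⟩
      rw [if_pos hr, if_pos hr, pvSet_add_fresh ind i hnotin]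
      apply ih (ind ++ [i]) hTbound hTpair
        (by simp only [List.nodup_append, List.nodup_singleton, true_and, and_true]; exact ⟨hnd, by simpa using fun a ha (he : a = i) => hnotin (he ▸ ha)⟩)
      intro k hk hkT
      rcases List.mem_append.mp hk with hk | hk
      · exact hH k hk (List.mem_cons_of_mem _ hkT)
      · simp only [List.mem_singleton] at hk; subst hk; exact absurd hkT hiT
    · rw [if_neg hr, if_neg hr]
      by_cases hmem : i ∈ ind
      · rw [if_pos hmem, pvAInner_eq_fold, pvABody_dead bl i (List.range bl.length) ind hmem]
        exact ih ind hTbound hTpair hnd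
          (fun k hk hkT => hH k hk (List.mem_cons_of_mem _ hkT))
      · rw [if_neg hmem, pvAInner_eq_fold, pvScan_eq bl i (List.range bl.length) ind hmem, pvNbrs_eq bl i]
        obtain ⟨S, hS, hSm⟩ := pvBScan_shape bl i ((List.range bl.length).filter (fun j => (pvAtoms bl i).any (fun a => (pvAtoms bl j).contains a))) ind hmem
        have hRnd := pvBScan_nodup bl i ((List.range bl.length).filter (fun j => (pvAtoms bl i).any (fun a => (pvAtoms bl j).contains a))) ind hmem hnd
        apply ih _ hTbound hTpair hRnd
        intro k hk hkT
        rw [hS] at hk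
        rcases List.mem_append.mp hk with hk | hk
        · exact hH k hk (List.mem_cons_of_mem _ hkT)
        · rcases hSm k hk with rfl | ⟨hkL, hkp⟩
          · exact absurd hkT hiT
          · have hkc := List.mem_filter.mp hkL
            have hconf : ∃ a ∈ pvAtoms bl i, a ∈ pvAtoms bl k := by
              simpa [List.any_eq_true, List.contains_iff_mem] using hkc.2
            refine ⟨i, hin, hTlt k hkT, hconf, hkp, ?_⟩
            rcases Bool.eq_false_or_eq_true ring with hb | hb
            · exact Or.inl hb
            · rcases lt_or_ge (pvPrio bl i) 4 with h4 | h4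
              · exact Or.inr h4
              · exact absurd ⟨hb, h4⟩ hr

-- ===== VERDICT (by name: the statement is the Claim_ definition above) =====
theorem ReduceSynthBonds_spec : Claim_equal_ReduceSynthBonds := by
  intro bl ring _hdom hpre
  unfold Spec_ReduceSynthBonds
  obtain ⟨_hp1, hp2⟩ := hpre
  have hp2' : ring = true ∨ ∀ i ∈ List.range bl.length, ∀ j ∈ List.range bl.length, i < j →
      (∃ a ∈ pvAtoms bl i, a ∈ pvAtoms bl j) → ¬(pvPrio bl i < 4 ∧ 4 ≤ pvPrio bl j) := by
    rcases hp2 with h | h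
    · exact Or.inl h
    · right
      rw [List.pairwise_iff_getElem] at h
      intro i hi j hj hij hconf
      have hi' : i < bl.length := List.mem_range.mp hi
      have hj' : j < bl.length := List.mem_range.mp hj
      have e1 : pvAtoms bl i = bl[i].1 := by unfold pvAtoms; rw [List.getD_eq_getElem bl _ hi']
      have e2 : pvAtoms bl j = bl[j].1 := by unfold pvAtoms; rw [List.getD_eq_getElem bl _ hj']
      have e3 : pvPrio bl i = bl[i].2.headD 0 := by unfold pvPrio; rw [List.getD_eq_getElem bl _ hi']
      have e4 : pvPrio bl j = bl[j].2.headD 0 := by unfold pvPrio; rw [List.getD_eq_getElem bl _ hj']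
      rw [e3, e4]
      exact h i j hi' hj' hij (by rw [← e1, ← e2]; exact hconf)
  obtain ⟨heq, hnd⟩ := pvOuter_eq bl ring hp2' (List.range bl.length) []
    (fun k hk => List.mem_range.mp hk) List.pairwise_lt_range List.nodup_nil (by simp)
  show ReduceSynthBonds bl ring = ReduceSynthBonds_alt bl ring
  simp only [ReduceSynthBonds, ReduceSynthBonds_alt, PySem.Set.empty]
  simp only [← heq]
  set R := (List.range bl.length).foldl (fun ind i =>
    if ring = false ∧ 4 ≤ pvPrio bl i then ind ++ [i] else pvAInner bl i ind) [] with hRdef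
  have hperm : ((PySem.List.sorted R (fun k => k) false).reverse).Perm R :=
    (List.reverse_perm _).trans (PySem.List.sorted_perm ..)
  have hndS : (PySem.List.sorted R (fun k => k) false).Nodup :=
    (PySem.List.sorted_perm ..).nodup_iff.mpr hnd
  have hpleR : (PySem.List.sorted R (fun k => k) false).Pairwise (· ≤ ·) := by
    have := PySem.List.sorted_pairwise (xs := R) (key := fun (k : Nat) => k)
    simpa using this
  have hplt : (PySem.List.sorted R (fun k => k) false).Pairwise (· < ·) :=
    (hpleR.and hndS).imp (fun h => lt_of_le_of_ne h.1 h.2)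
  have hrev : PySem.List.sorted R (fun k => k) true
      = (PySem.List.sorted R (fun k => k) false).reverse := by
    apply PySem.List.sorted_rev_eq_of_perm_of_pairwise_gt
    · exact hperm
    · exact List.pairwise_reverse.mpr (hplt.imp (fun h => h))
  rw [hrev, List.foldl_reverse, pvFoldr_erase bl _ hplt,
    pvKeep_congr bl _ R 0 (fun x _ => PySem.List.mem_sorted R (fun k => k) false x),
    pvKeep_eq_filter_range bl R 0 ([], []), ← List.range_eq_range']
  simp
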